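-- pv_equiv track=rewrite | github.com/smpotts/advent-of-code-2025 | day_3_lobby.py | part_1
-- ===== SOURCE A (Python) =====
-- def part_1(int_list):
--     max_jolt = int_list[0]
--     joltage_options = []
--     for i in range(0, len(int_list)-1):
--         number = int_list[i]
--         if number >= max_jolt:
--             max_jolt = number
--             max_ahead = max(int_list[i+1:])
--             concat_num = str(max_jolt) + str(max_ahead)
--             joltage_options.append(int(concat_num))
--     return joltage_options
-- ===== SOURCE B (Python) =====
-- def part_1(int_list):
--     # suffix maxima: suf[i] = max(int_list[i:]), built in one backward pass
--     rev = []
--     cur = int_list[-1]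
--     for x in reversed(int_list):
--         cur = cur if cur >= x else x
--         rev.append(cur)
--     suf = rev[::-1]
--     res = []
--     max_jolt = int_list[0]
--     for x, ahead in zip(int_list, suf[1:]):
--         if x >= max_jolt:
--             max_jolt = x
--             res.append(int(str(x) + str(ahead)))
--     return res
-- ===== Notes on version B (the rewrite author's own statement) =====
-- stated objective: faster
-- what changed: Replaces the per-iteration max(int_list[i+1:]) suffix scan with a suffix-maximum array precomputed in one backward pass, then a single forward pass over zip(list, suffix_max[1:]).
-- outside the precondition, e.g. on part_1([]): A raises IndexError, B raises IndexError
import Mathlib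
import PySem

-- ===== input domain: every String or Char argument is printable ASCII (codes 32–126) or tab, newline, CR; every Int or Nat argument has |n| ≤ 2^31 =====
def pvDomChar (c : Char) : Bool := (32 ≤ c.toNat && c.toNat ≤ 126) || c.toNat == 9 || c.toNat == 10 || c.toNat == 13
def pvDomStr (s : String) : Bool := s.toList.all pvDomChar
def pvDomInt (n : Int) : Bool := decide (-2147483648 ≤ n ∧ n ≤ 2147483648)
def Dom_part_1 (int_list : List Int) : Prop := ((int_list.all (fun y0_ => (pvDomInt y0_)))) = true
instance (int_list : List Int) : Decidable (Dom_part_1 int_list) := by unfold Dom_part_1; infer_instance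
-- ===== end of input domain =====

-- B replaces A's per-iteration max(int_list[i+1:]) slice scan by a suffix-maximum
-- array built in one backward pass, then a single forward zip pass (faster, O(n) vs O(n^2)).

-- ===== PORT A =====
-- int(str(a) + str(b)); the .getD 0 is only reached where Python's int() raises (outside Pre_)
def pvConcat (a b : Int) : Int :=
  (PySem.Int.ofStr? (PySem.Int.toStr a ++ PySem.Int.toStr b)).getD 0

def part_1 (int_list : List Int) : List Int :=
  ((PySem.List.pyRange 0 ((int_list.length : Int) - 1) 1).foldl
    (fun (st : Int × List Int) i =>
      let number := PySem.List.pyGetD int_list i 0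
      if number ≥ st.1 then
        -- max(int_list[i+1:]); the slice is nonempty for i in range, .getD 0 unreached
        let max_ahead := (PySem.List.max? (PySem.List.slice int_list (some (i + 1)) none)
                            (fun y => y)).getD 0
        (number, st.2 ++ [pvConcat number max_ahead])
      else st)
    (PySem.List.pyGetD int_list 0 0, ([] : List Int))).2

-- ===== PORT B =====
def part_1_alt (int_list : List Int) : List Int :=
  -- backward pass: rev collects running maxima of the reversed list
  let rev := (int_list.reverse.foldl
      (fun (st : Int × List Int) x =>
        let cur := if st.1 ≥ x then st.1 else x
        (cur, st.2 ++ [cur]))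
      ((int_list.getLast?).getD 0, ([] : List Int))).2
  let suf := rev.reverse          -- rev[::-1]
  ((int_list.zip (PySem.List.slice suf (some 1) none)).foldl
      (fun (st : Int × List Int) p =>
        if p.1 ≥ st.1 then (p.1, st.2 ++ [pvConcat p.1 p.2]) else st)
      (PySem.List.pyGetD int_list 0 0, ([] : List Int))).2

-- ===== PRECONDITION & SPEC =====
-- Pre_ holds exactly where Python A returns: the list is nonempty (int_list[0] raises
-- IndexError on []) and at every prefix-maximum position i before the last index the
-- remaining suffix contains a nonnegative element (otherwise str(max_jolt)+str(max_ahead)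
-- has an inner '-' and int() raises ValueError).
def Pre_part_1 (int_list : List Int) : Prop :=
  int_list ≠ [] ∧
  ∀ i < int_list.length - 1,
    (∀ j < i, int_list.getD j 0 ≤ int_list.getD i 0) →
    ∃ x ∈ int_list.drop (i + 1), 0 ≤ x
instance (int_list : List Int) : Decidable (Pre_part_1 int_list) := by
  unfold Pre_part_1; infer_instance

def pvWitness_part_1 : List Int := [3, 1, 2]

def Spec_part_1 (int_list : List Int) (out : List Int) : Prop := out = part_1_alt int_list
instance (int_list : List Int) (out : List Int) : Decidable (Spec_part_1 int_list out) := by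
  unfold Spec_part_1; infer_instance

-- ===== CLAIM (what is proved, stated in full; the proofs are below) =====
def Claim_equal_part_1 : Prop :=
  ∀ (int_list : List Int), Dom_part_1 int_list → Pre_part_1 int_list →
    Spec_part_1 int_list (part_1 int_list)

-- ===== LEMMAS AND PROOFS =====

-- suffix maxima: refMax l at index i is the max of l.drop i
def refMax : List Int → List Int
  | [] => []
  | x :: t => (t.foldl max x) :: refMax t

-- reference run: the common value both loops compute
def refRun (mj : Int) : List Int → List Int
  | [] => []
  | [_] => []
  | x :: y :: t =>
      if x ≥ mj then pvConcat x (t.foldl max y) :: refRun x (y :: t)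
      else refRun mj (y :: t)

theorem refRun_short (mj : Int) (s : List Int) (h : s.length ≤ 1) : refRun mj s = [] := by
  match s, h with
  | [], _ => rfl
  | [_], _ => rfl

theorem lemA (l : List Int) :
    ∀ (m k : Nat) (mj : Int) (acc : List Int), m = l.length - 1 - k →
    ((PySem.List.pyRange (k : Int) ((l.length : Int) - 1) 1).foldl
      (fun (st : Int × List Int) i =>
        let number := PySem.List.pyGetD l i 0
        if number ≥ st.1 then
          let max_ahead := (PySem.List.max? (PySem.List.slice l (some (i + 1)) none)
                              (fun y => y)).getD 0
          (number, st.2 ++ [pvConcat number max_ahead])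
        else st)
      (mj, acc)).2 = acc ++ refRun mj (l.drop k) := by
  intro m
  induction m with
  | zero =>
      intro k mj acc hm
      have hk : l.length ≤ k + 1 := by omega
      have hnil : PySem.List.pyRange (k : Int) ((l.length : Int) - 1) 1 = [] := by
        apply PySem.List.pyRange_one_eq_nil; omega
      rw [hnil]
      have : (l.drop k).length ≤ 1 := by simp; omega
      rw [refRun_short mj _ this]; simp
  | succ m ih =>
      intro k mj acc hm
      have hk1 : k + 1 < l.length := by omega
      have hcons : PySem.List.pyRange (k : Int) ((l.length : Int) - 1) 1 =
          (k : Int) :: PySem.List.pyRange ((k : Int) + 1) ((l.length : Int) - 1) 1 := by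
        apply PySem.List.pyRange_one_cons; omega
      rw [hcons, List.foldl_cons]
      have hget : PySem.List.pyGetD l (k : Int) 0 = l[k]'(by omega) := by
        rw [PySem.List.pyGetD_natCast]; exact List.getD_eq_getElem l 0 (by omega)
      have hslice : PySem.List.slice l (some ((k : Int) + 1)) none = l.drop (k + 1) := by
        have : ((k : Int) + 1) = ((k + 1 : Nat) : Int) := by push_cast; ring
        rw [this, PySem.List.slice_from_natCast]
      have hdropk : l.drop k = l[k]'(by omega) :: l.drop (k + 1) :=
        List.drop_eq_getElem_cons (by omega)
      obtain ⟨y, t, hyt⟩ : ∃ y t, l.drop (k + 1) = y :: t := by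
        cases hd : l.drop (k + 1) with
        | nil => exfalso; have := congrArg List.length hd; simp at this; omega
        | cons y t => exact ⟨y, t, rfl⟩
      have hmax : (PySem.List.max? (PySem.List.slice l (some ((k : Int) + 1)) none)
          (fun y => y)).getD 0 = t.foldl max y := by
        rw [hslice, hyt, PySem.List.max?_id_cons]; rfl
      have hcast : ((k : Int) + 1) = ((k + 1 : Nat) : Int) := by push_cast; ring
      simp only [hget, hmax]
      by_cases hcond : l[k]'(by omega) ≥ mj
      · rw [if_pos hcond]
        rw [hcast, ih (k + 1) _ _ (by omega)]
        rw [hdropk, hyt]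
        simp [refRun, if_pos hcond, List.append_assoc]
      · rw [if_neg hcond]
        rw [hcast, ih (k + 1) _ _ (by omega)]
        rw [hdropk, hyt]
        simp [refRun, if_neg hcond]

-- the cur-sequence of B's backward loop
def curs (c : Int) : List Int → List Int
  | [] => []
  | x :: t => (if c ≥ x then c else x) :: curs (if c ≥ x then c else x) t

theorem step_eq_max (c x : Int) : (if c ≥ x then c else x) = max x c := by
  rw [max_comm]; simp [max_def]; omega

theorem lemB1 (r : List Int) : ∀ (c : Int) (acc : List Int),
    r.foldl (fun (st : Int × List Int) x =>
        let cur := if st.1 ≥ x then st.1 else x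
        (cur, st.2 ++ [cur])) (c, acc)
      = (r.foldl (fun a x => if a ≥ x then a else x) c, acc ++ curs c r) := by
  induction r with
  | nil => intro c acc; simp [curs]
  | cons x t ih => intro c acc; simp only [List.foldl_cons, curs, ih]; simp

theorem fmax_eq (r : List Int) : ∀ c : Int,
    r.foldl (fun a x => if a ≥ x then a else x) c = r.foldl (fun a x => max x a) c := by
  induction r with
  | nil => intro c; rfl
  | cons x t ih => intro c; simp only [List.foldl_cons, step_eq_max]

theorem foldl_max_pull (t : List Int) : ∀ a b : Int,
    t.foldl max (max a b) = max a (t.foldl max b) := by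
  induction t with
  | nil => intro a b; rfl
  | cons x t ih =>
      intro a b
      simp only [List.foldl_cons]
      rw [show max (max a b) x = max a (max b x) from max_assoc a b x]
      exact ih a (max b x)

theorem foldl_max_flip (t : List Int) : ∀ c : Int,
    t.foldl (fun a x => max x a) c = t.foldl max c := by
  induction t with
  | nil => intro c; rfl
  | cons x t ih => intro c; simp only [List.foldl_cons, max_comm]

theorem foldl_max_reverse (t : List Int) : ∀ c : Int,
    t.reverse.foldl max c = t.foldl max c := by
  induction t with
  | nil => intro c; rfl
  | cons x t ih =>
      intro c
      rw [List.reverse_cons, List.foldl_append]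
      simp only [List.foldl_cons, List.foldl_nil, ih]
      rw [show t.foldl max (max c x) = max x (t.foldl max c) by
        rw [max_comm c x, foldl_max_pull]]
      rw [max_comm]

theorem curs_append (u v : List Int) : ∀ c : Int,
    curs c (u ++ v) = curs c u ++ curs (u.foldl (fun a x => if a ≥ x then a else x) c) v := by
  induction u with
  | nil => intro c; rfl
  | cons x t ih => intro c; simp only [List.cons_append, curs, ih, List.foldl_cons]

theorem elem_le_foldl_max (t : List Int) : ∀ (c g : Int), g ∈ t → g ≤ t.foldl max c := by
  induction t with
  | nil => intro c g h; simp at h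
  | cons x t ih =>
      intro c g h
      rcases List.mem_cons.mp h with h | h
      · subst h
        simp only [List.foldl_cons]
        calc g ≤ max c g := le_max_right _ _
          _ ≤ t.foldl max (max c g) := (PySem.List.le_foldl_max t _).1
      · simp only [List.foldl_cons]
        exact ih (max c x) g h

theorem lemB2 (l : List Int) :
    curs ((l.getLast?).getD 0) l.reverse = (refMax l).reverse := by
  induction l with
  | nil => rfl
  | cons x t ih =>
      cases t with
      | nil => simp [curs, refMax]
      | cons y t' =>
          have hlast : ((x :: y :: t').getLast?).getD 0 = ((y :: t').getLast?).getD 0 := by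
            rw [List.getLast?_cons_cons]
          set g : Int := ((y :: t').getLast?).getD 0 with hg
          have hgmem : g ∈ y :: t' := by
            rw [hg]
            cases hL : (y :: t').getLast? with
            | none => simp at hL
            | some z =>
                simpa using List.mem_of_getLast? hL
          have hrev : (x :: y :: t').reverse = (y :: t').reverse ++ [x] := by
            simp
          rw [hlast, hrev, curs_append, ih]
          have hM : ((y :: t').reverse).foldl (fun a x => if a ≥ x then a else x) g
              = t'.foldl max y := by
            rw [fmax_eq, foldl_max_flip, foldl_max_reverse]
            simp only [List.foldl_cons]
            rw [foldl_max_pull]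
            apply max_eq_right
            have hle := elem_le_foldl_max (y :: t') y g hgmem
            simpa [max_self] using hle
          rw [hM]
          have hhead : (if t'.foldl max y ≥ x then t'.foldl max y else x)
              = (y :: t').foldl max x := by
            rw [step_eq_max]
            simp only [List.foldl_cons]
            rw [foldl_max_pull]
          simp [curs, refMax, hhead]

theorem refMax_tail (l : List Int) : (refMax l).tail = refMax l.tail := by
  cases l <;> rfl

theorem lemB3 (l : List Int) : ∀ (mj : Int) (acc : List Int),
    ((l.zip ((refMax l).tail)).foldl
      (fun (st : Int × List Int) p =>
        if p.1 ≥ st.1 then (p.1, st.2 ++ [pvConcat p.1 p.2]) else st)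
      (mj, acc)).2 = acc ++ refRun mj l := by
  induction l with
  | nil => intro mj acc; simp [refMax, refRun]
  | cons x l' ih =>
      intro mj acc
      cases l' with
      | nil => simp [refMax, refRun]
      | cons y t =>
          have hzip : (x :: y :: t).zip ((refMax (x :: y :: t)).tail)
              = (x, t.foldl max y) :: ((y :: t).zip ((refMax (y :: t)).tail)) := by
            simp [refMax]
          rw [hzip, List.foldl_cons]
          by_cases hcond : x ≥ mj
          · simp only [if_pos hcond]
            rw [ih]
            simp [refRun, if_pos hcond, List.append_assoc]
          · simp only [if_neg hcond]
            rw [ih]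
            simp [refRun, if_neg hcond]

theorem part_1_eq (l : List Int) : part_1 l = refRun (PySem.List.pyGetD l 0 0) l := by
  unfold part_1
  have := lemA l (l.length - 1 - 0) 0 (PySem.List.pyGetD l 0 0) [] rfl
  simpa using this

theorem part_1_alt_eq (l : List Int) :
    part_1_alt l = refRun (PySem.List.pyGetD l 0 0) l := by
  unfold part_1_alt
  rw [lemB1]
  simp only [List.nil_append]
  rw [lemB2, List.reverse_reverse, PySem.List.slice_from_one, refMax_tail]
  have hrt : refMax l.tail = (refMax l).tail := (refMax_tail l).symm
  rw [hrt, lemB3]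
  simp

theorem part_1_agree (l : List Int) : part_1 l = part_1_alt l := by
  rw [part_1_eq, part_1_alt_eq]

-- ===== VERDICT (by name: the statement is the Claim_ definition above) =====
theorem part_1_spec : Claim_equal_part_1 := by
  intro l _ _
  show part_1 l = part_1_alt l
  exact part_1_agree l
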